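-- pv_equiv track=rewrite | github.com/Lotfullah21/Data-Structures-And-Algorithms | 15-sorting/problems/goodInteger/goodInteger.py | goodIntegers
-- ===== SOURCE A (Python) =====
-- def goodIntegers(arr: list) -> list[int]:
--     "Returns number of good integers"
--     n = len(arr)
--     goodIntegers = []
--     for i in range(n):
--         c = 0
--         for j in range(n):
--             if arr[i]>arr[j]:
--                 c+=1
--         if c==arr[i]:
--             goodIntegers.append(arr[i])
--     return goodIntegers
-- ===== SOURCE B (Python) =====
-- from bisect import bisect_left
--
-- def goodIntegers(arr: list) -> list[int]:
--     "Returns number of good integers"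
--     s = sorted(arr)
--     return [x for x in arr if bisect_left(s, x) == x]
-- ===== Notes on version B (the rewrite author's own statement) =====
-- stated objective: faster
-- what changed: Replaces the quadratic nested count loop by sorting once and computing each element's strictly-smaller count as its bisect_left rank in the sorted copy.
import Mathlib
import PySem

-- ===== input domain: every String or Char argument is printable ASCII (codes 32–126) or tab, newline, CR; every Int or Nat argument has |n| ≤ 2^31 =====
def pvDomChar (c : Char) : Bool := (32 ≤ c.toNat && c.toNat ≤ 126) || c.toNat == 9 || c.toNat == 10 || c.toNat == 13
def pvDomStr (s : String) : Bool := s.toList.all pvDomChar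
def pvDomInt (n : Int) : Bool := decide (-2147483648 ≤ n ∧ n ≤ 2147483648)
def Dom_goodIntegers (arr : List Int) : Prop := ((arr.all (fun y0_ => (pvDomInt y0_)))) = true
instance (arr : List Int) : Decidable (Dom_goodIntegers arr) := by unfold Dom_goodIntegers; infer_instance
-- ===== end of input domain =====

-- B replaces A's quadratic nested count loop by one sort plus a bisect_left rank per element (faster).

-- ===== PORT A =====
def goodIntegers (arr : List Int) : List Int :=
  let n := PySem.List.len arr
  (PySem.List.pyRange 0 n 1).foldl (fun good i =>
    let c : Int := (PySem.List.pyRange 0 n 1).foldl (fun c j =>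
      if PySem.List.pyGetD arr i 0 > PySem.List.pyGetD arr j 0 then c + 1 else c) 0
    if c = PySem.List.pyGetD arr i 0 then good ++ [PySem.List.pyGetD arr i 0] else good) []

-- ===== PORT B =====
def goodIntegers_alt (arr : List Int) : List Int :=
  let s := PySem.List.sorted arr (fun x => x) false
  arr.filter (fun x => decide ((PySem.List.bisectLeft s x : Int) = x))

-- ===== PRECONDITION & SPEC =====
def Spec_goodIntegers (arr : List Int) (out : List Int) : Prop := out = goodIntegers_alt arr
instance (arr : List Int) (out : List Int) : Decidable (Spec_goodIntegers arr out) := by unfold Spec_goodIntegers; infer_instance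

-- ===== CLAIM (what is proved, stated in full; the proofs are below) =====
def Claim_equal_goodIntegers : Prop := ∀ (arr : List Int), Dom_goodIntegers arr → Spec_goodIntegers arr (goodIntegers arr)

-- ===== LEMMAS AND PROOFS =====

-- On a sorted list, bisect_left's result is the number of elements strictly below x.
theorem countP_lt_eq_bisectLeft (s : List Int) (x : Int) (h : s.Pairwise (· ≤ ·)) :
    s.countP (fun y => decide (y < x)) = PySem.List.bisectLeft s x := by
  obtain ⟨hk, hlt, hge⟩ := PySem.List.bisectLeft_spec s x h
  set k := PySem.List.bisectLeft s x with hkdef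
  have hsplit : s = s.take k ++ s.drop k := (List.take_append_drop k s).symm
  have h1 : (s.take k).countP (fun y => decide (y < x)) = k := by
    have : ∀ a ∈ s.take k, (fun y => decide (y < x)) a = true := by
      intro a ha
      obtain ⟨i, hi, rfl⟩ := List.mem_iff_getElem.mp ha
      have hi' : i < s.length := by simp at hi; omega
      rw [List.getElem_take]
      simp only [decide_eq_true_eq]
      exact hlt i hi' (by simp at hi; omega)
    rw [List.countP_eq_length.mpr this, List.length_take]
    omega
  have h2 : (s.drop k).countP (fun y => decide (y < x)) = 0 := by
    apply List.countP_eq_zero.mpr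
    intro a ha
    obtain ⟨i, hi, rfl⟩ := List.mem_iff_getElem.mp ha
    have hi' : k + i < s.length := by simp at hi; omega
    rw [List.getElem_drop]
    simp only [decide_eq_true_eq, not_lt]
    exact hge (k + i) hi' (by omega)
  calc s.countP (fun y => decide (y < x))
      = (s.take k ++ s.drop k).countP (fun y => decide (y < x)) := by rw [← hsplit]
    _ = k := by rw [List.countP_append, h1, h2]; ring


-- The count of strictly-smaller elements in arr equals the bisect rank in sorted(arr).
theorem countP_eq_rank (arr : List Int) (x : Int) :
    arr.countP (fun y => decide (y < x))
      = PySem.List.bisectLeft (PySem.List.sorted arr (fun x => x) false) x := by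
  rw [← countP_lt_eq_bisectLeft _ x (PySem.List.sorted_pairwise arr (fun x => x))]
  exact ((PySem.List.sorted_perm arr (fun x => x) false).countP_eq _).symm

-- ===== VERDICT (by name: the statement is the Claim_ definition above) =====
theorem goodIntegers_spec : Claim_equal_goodIntegers := by
  intro arr _
  unfold Spec_goodIntegers goodIntegers goodIntegers_alt
  simp only []
  rw [PySem.List.foldl_pyRange_zero_pyGetD arr 0
    (fun good x =>
      let c : Int := (PySem.List.pyRange 0 (PySem.List.len arr) 1).foldl (fun c j =>
        if x > PySem.List.pyGetD arr j 0 then c + 1 else c) 0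
      if c = x then good ++ [x] else good) []]
  have hinner : ∀ x : Int,
      (PySem.List.pyRange 0 (PySem.List.len arr) 1).foldl (fun c j =>
        if x > PySem.List.pyGetD arr j 0 then c + 1 else c) 0
      = (arr.countP (fun y => decide (y < x)) : Int) := by
    intro x
    rw [PySem.List.foldl_pyRange_zero_pyGetD arr 0 (fun c y => if x > y then c + 1 else c) 0]
    have := PySem.List.foldl_count_if (fun y => decide (y < x)) arr 0
    simpa using this
  calc arr.foldl (fun good x =>
        let c : Int := (PySem.List.pyRange 0 (PySem.List.len arr) 1).foldl (fun c j =>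
          if x > PySem.List.pyGetD arr j 0 then c + 1 else c) 0
        if c = x then good ++ [x] else good) []
      = arr.foldl (fun good x =>
        if (arr.countP (fun y => decide (y < x)) : Int) = x then good ++ [x] else good) [] := by
        apply PySem.List.foldl_congr_mem
        intro good x _
        simp only [hinner x]
    _ = arr.filter (fun x => decide ((PySem.List.bisectLeft
          (PySem.List.sorted arr (fun x => x) false) x : Int) = x)) := by
        rw [PySem.List.foldl_append_ite_eq_filter
          (fun x => (arr.countP (fun y => decide (y < x)) : Int) = x) arr []]
        simp only [List.nil_append]
        apply List.filter_congr
        intro x _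
        rw [countP_eq_rank arr x]
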